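-- pv_equiv track=rewrite | github.com/Sarath-Chelluri/DSA | minServers.py | getMinServers
-- ===== SOURCE A (Python) =====
-- def getMinServers(expected_load, n, server):
--     output = []
--     if max(server) == expected_load or min(server) == expected_load:
--         return 1
--     while expected_load != sum(output) and expected_load != sum(server):
--         if server == []:
--             return -1
--         output.append(min(server))
--         server.remove(min(server))
--     if sum(server) == expected_load:
--         return len(server)
--     return len(output)
-- ===== SOURCE B (Python) =====
-- def getMinServers(expected_load, n, server):
--     # Note: unlike A, B does not mutate the caller's list (A empties/shrinks `server` via remove);
--     # the equivalence is about the return value.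
--     if max(server) == expected_load or min(server) == expected_load:
--         return 1
--     s = sorted(server)
--     total = sum(s)
--     pre = 0
--     for k, v in enumerate(s):
--         if total - pre == expected_load:
--             return len(s) - k
--         if pre == expected_load:
--             return k
--         pre += v
--     # here pre == total and the remaining sum is 0
--     if expected_load == 0:
--         return 0
--     if total == expected_load:
--         return len(s)
--     return -1
-- ===== Notes on version B (the rewrite author's own statement) =====
-- stated objective: faster
-- what changed: A repeatedly computes min/remove and re-sums server and output on every loop iteration (quadratic); B sorts the list once and walks it with a running prefix sum, so each stopping condition is an O(1) check.
import Mathlib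
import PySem

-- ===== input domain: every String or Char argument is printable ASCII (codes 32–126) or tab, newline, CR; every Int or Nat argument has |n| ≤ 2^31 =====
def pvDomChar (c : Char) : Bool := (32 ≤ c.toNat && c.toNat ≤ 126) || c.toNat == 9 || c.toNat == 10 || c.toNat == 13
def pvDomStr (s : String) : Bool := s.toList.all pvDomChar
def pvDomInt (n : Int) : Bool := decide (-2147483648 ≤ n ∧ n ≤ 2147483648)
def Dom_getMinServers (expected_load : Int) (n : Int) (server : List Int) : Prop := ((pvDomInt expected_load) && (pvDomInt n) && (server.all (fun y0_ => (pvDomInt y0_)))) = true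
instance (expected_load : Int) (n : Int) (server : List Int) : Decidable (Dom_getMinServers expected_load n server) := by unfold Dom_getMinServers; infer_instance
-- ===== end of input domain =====

-- B replaces A's repeated min/remove/re-sum loop (quadratic) by one sort plus a prefix-sum walk;
-- A mutates its `server` argument in place (remove), B does not: the equivalence is about the return value.

-- ===== PORT A =====
-- A's while loop: state (output, server); each pass re-checks the sums, moves min(server) to output.
def pvLoopA (expected : Int) (output server : List Int) : Int :=
  if expected ≠ output.sum ∧ expected ≠ server.sum then
    if server = [] then -1
    else
      -- min(server); server is nonempty here so min? is some (getD value unused on raising inputs)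
      let m := (PySem.List.min? server (fun x => x)).getD 0
      pvLoopA expected (output ++ [m]) ((PySem.List.remove? server m).getD [])
  else
    if server.sum = expected then (server.length : Int) else (output.length : Int)
termination_by server.length
decreasing_by
  rename_i hne
  cases h : PySem.List.remove? server m with
  | none => simpa [h] using List.length_pos_of_ne_nil hne
  | some l =>
    have hm : m ∈ server := by
      by_contra hnm
      rw [(PySem.List.remove?_eq_none_iff server m).2 hnm] at h; cases h
    rw [PySem.List.remove?_eq_some_erase server m hm] at h
    cases h
    simp only [Option.getD_some, List.length_erase_of_mem hm]
    have := List.length_pos_of_ne_nil hne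
    omega

def getMinServers (expected_load : Int) (n : Int) (server : List Int) : Int :=
  -- max(server) / min(server): raise on empty server (excluded by Pre_); getD value there is arbitrary
  let mx := (PySem.List.max? server (fun x => x)).getD 0
  let mn := (PySem.List.min? server (fun x => x)).getD 0
  if mx = expected_load ∨ mn = expected_load then 1
  else pvLoopA expected_load [] server

-- ===== PORT B =====
-- B's for-loop over the sorted list: running prefix sum `pre`, index `k`, sLen = len(s).
def pvLoopB (expected total : Int) (sLen : Nat) (pre : Int) (k : Nat) (rest : List Int) : Int :=
  match rest with
  | [] =>
    if expected = 0 then 0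
    else if total = expected then (sLen : Int)
    else -1
  | v :: rs =>
    if total - pre = expected then (sLen : Int) - (k : Int)
    else if pre = expected then (k : Int)
    else pvLoopB expected total sLen (pre + v) (k + 1) rs

def getMinServers_alt (expected_load : Int) (n : Int) (server : List Int) : Int :=
  let mx := (PySem.List.max? server (fun x => x)).getD 0
  let mn := (PySem.List.min? server (fun x => x)).getD 0
  if mx = expected_load ∨ mn = expected_load then 1
  else
    let s := PySem.List.sorted server (fun x => x) false
    pvLoopB expected_load s.sum s.length 0 0 s

-- ===== PRECONDITION & SPEC =====
-- Pre_ excludes only the empty server list, on which Python A raises ValueError (max of empty sequence).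
def Pre_getMinServers (expected_load : Int) (n : Int) (server : List Int) : Prop := server ≠ []
instance (expected_load : Int) (n : Int) (server : List Int) : Decidable (Pre_getMinServers expected_load n server) := by unfold Pre_getMinServers; infer_instance
def pvWitness_getMinServers : Int × Int × List Int := (3, 3, [2, 1, 4])

def Spec_getMinServers (expected_load : Int) (n : Int) (server : List Int) (out : Int) : Prop := out = getMinServers_alt expected_load n server
instance (expected_load : Int) (n : Int) (server : List Int) (out : Int) : Decidable (Spec_getMinServers expected_load n server out) := by unfold Spec_getMinServers; infer_instance

-- ===== CLAIM (what is proved, stated in full; the proofs are below) =====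
def Claim_equal_getMinServers : Prop := ∀ (expected_load : Int) (n : Int) (server : List Int), Dom_getMinServers expected_load n server → Pre_getMinServers expected_load n server → Spec_getMinServers expected_load n server (getMinServers expected_load n server)

-- ===== LEMMAS AND PROOFS =====

-- A's loop state vs B's sorted walk: if `rest` is a sorted rearrangement of A's current `server`,
-- `pre`/`k` mirror output's sum/length and `total`/`sLen` the global sum/length, the loops agree.
lemma pvLoop_eq (expected : Int) :
    ∀ (rest output server : List Int) (pre : Int) (k sLen : Nat),
      rest.Pairwise (· ≤ ·) → server.Perm rest → pre = output.sum → k = output.length →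
      sLen = k + rest.length →
      pvLoopA expected output server = pvLoopB expected (pre + rest.sum) sLen pre k rest := by
  intro rest
  induction rest with
  | nil =>
    intro output server pre k sLen _ hperm hpre hk hlen
    have hserver : server = [] := List.Perm.eq_nil hperm
    subst hserver
    subst hpre hk hlen
    unfold pvLoopA pvLoopB
    simp only [List.sum_nil, List.length_nil, Nat.add_zero, add_zero]
    split_ifs <;> omega
  | cons v rs ih =>
    intro output server pre k sLen hpw hperm hpre hk hlen
    simp only [List.length_cons] at hlen
    have hsum : server.sum = v + rs.sum := by rw [List.Perm.sum_eq hperm]; simp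
    unfold pvLoopA pvLoopB
    by_cases hrem : server.sum = expected
    · -- B's first branch: total - pre = rest.sum = server.sum = expected
      have hb : pre + (v + rs.sum) - pre = expected := by omega
      have hlenp : server.length = rs.length + 1 := by
        rw [List.Perm.length_eq hperm]; simp
      simp only [List.sum_cons, hb, if_pos]
      have : ¬ (expected ≠ output.sum ∧ expected ≠ server.sum) := by
        intro hc; exact hc.2 hrem.symm
      rw [if_neg this, if_pos hrem]
      omega
    · have hb : ¬ (pre + (v + rs.sum) - pre = expected) := by omega
      simp only [List.sum_cons, hb, if_false]
      by_cases hout : pre = expected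
      · -- B's second branch; A exits with output.length
        have : ¬ (expected ≠ output.sum ∧ expected ≠ server.sum) := by
          intro hc; exact hc.1 (by omega)
        rw [if_pos hout, if_neg this, if_neg hrem, hk]
      · -- both loops take a step
        have hcond : expected ≠ output.sum ∧ expected ≠ server.sum := by
          constructor
          · intro hc; exact hout (by omega)
          · intro hc; exact hrem hc.symm
        rw [if_neg hout, if_pos hcond]
        obtain ⟨x, xs, hx⟩ : ∃ x xs, server = x :: xs := by
          cases server with
          | nil => exact absurd (List.Perm.eq_nil hperm.symm) (by simp)
          | cons a as => exact ⟨a, as, rfl⟩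
        subst hx
        -- min(server) = v (v heads the sorted rearrangement)
        obtain ⟨m, hm⟩ : ∃ m, PySem.List.min? (x :: xs) (fun y => y) = some m := by
          cases h : PySem.List.min? (x :: xs) (fun y => y) with
          | none => exact absurd ((PySem.List.min?_eq_none_iff (x :: xs) (fun y => y)).1 h) (List.cons_ne_nil x xs)
          | some m => exact ⟨m, rfl⟩
        have hmmem : m ∈ x :: xs := PySem.List.min?_mem hm
        have hvmem : v ∈ x :: xs := (List.Perm.mem_iff hperm).2 (by simp)
        have hmv' : m = v := by
          have h1 : m ≤ v := PySem.List.min?_isMin hm v hvmem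
          have h2 : v ≤ m := by
            have := (List.Perm.mem_iff hperm).1 hmmem
            rcases List.mem_cons.1 this with h | h
            · omega
            · exact (List.pairwise_cons.1 hpw).1 m h
          omega
        subst hmv'
        have hrem2 : PySem.List.remove? (x :: xs) m = some ((x :: xs).erase m) :=
          PySem.List.remove?_eq_some_erase (x :: xs) m hmmem
        simp only [hm, hrem2, Option.getD_some]
        have hperm' : ((x :: xs).erase m).Perm rs := by
          have := List.Perm.erase m hperm
          rwa [List.erase_cons_head] at this
        have := ih (output ++ [m]) ((x :: xs).erase m) (pre + m) (k + 1) sLen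
          (List.pairwise_cons.1 hpw).2 hperm'
          (by simp [hpre]) (by simp [hk]) (by omega)
        exact this.trans (by rw [add_assoc])

-- ===== VERDICT (by name: the statement is the Claim_ definition above) =====
theorem getMinServers_spec : Claim_equal_getMinServers := by
  intro expected_load n server _ _
  unfold Spec_getMinServers getMinServers getMinServers_alt
  by_cases h : (PySem.List.max? server (fun x => x)).getD 0 = expected_load ∨
      (PySem.List.min? server (fun x => x)).getD 0 = expected_load
  · simp [h]
  · simp only [h, if_false]
    have := pvLoop_eq expected_load (PySem.List.sorted server (fun x => x) false) [] server 0 0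
      (PySem.List.sorted server (fun x => x) false).length
      (by simpa using PySem.List.sorted_pairwise server (fun x => x))
      (PySem.List.sorted_perm server (fun x => x) false).symm
      rfl rfl (by simp)
    rw [zero_add] at this
    exact this
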